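-- pv_equiv track=rewrite | github.com/JustM3Sunny/new_test | core/general_intelligence.py | _infer_project_type
-- ===== SOURCE A (Python) =====
-- from typing import Dict, List, Any, Optional, Tuple
--
-- def _infer_project_type(files: List[str]) -> str:
--     """Infer project type from file extensions."""
--     extensions = [file.split('.')[-1].lower() for file in files if '.' in file]
--
--     if any(ext in extensions for ext in ['py']):
--         return "python_project"
--     elif any(ext in extensions for ext in ['js', 'jsx', 'ts', 'tsx']):
--         return "javascript_project"
--     elif any(ext in extensions for ext in ['java']):
--         return "java_project"
--     elif any(ext in extensions for ext in ['cpp', 'c', 'h']):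
--         return "cpp_project"
--     elif any(ext in extensions for ext in ['go']):
--         return "go_project"
--
--     return "mixed_project"
-- ===== SOURCE B (Python) =====
-- # B: one pass with an extension -> (priority_rank, project_type) table and a running
-- # minimum, replacing A's build-a-list-then-five-category-scans. Objective: simpler/idiomatic.
-- _EXT_RANK = {
--     "py": (0, "python_project"),
--     "js": (1, "javascript_project"),
--     "jsx": (1, "javascript_project"),
--     "ts": (1, "javascript_project"),
--     "tsx": (1, "javascript_project"),
--     "java": (2, "java_project"),
--     "cpp": (3, "cpp_project"),
--     "c": (3, "cpp_project"),
--     "h": (3, "cpp_project"),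
--     "go": (4, "go_project"),
-- }
--
-- def _infer_project_type(files):
--     best = None
--     for f in files:
--         if '.' not in f:
--             continue
--         hit = _EXT_RANK.get(f.split('.')[-1].lower())
--         if hit is not None and (best is None or hit[0] < best[0]):
--             best = hit
--     return best[1] if best is not None else "mixed_project"
-- ===== Notes on version B (the rewrite author's own statement) =====
-- stated objective: idiomatic
-- what changed: Replaced the build-extensions-list-then-five-sequential-category-membership-scans with a single pass over the files keeping the (priority_rank, project_type) with the smallest rank via one extension->rank lookup table.
import Mathlib
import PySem

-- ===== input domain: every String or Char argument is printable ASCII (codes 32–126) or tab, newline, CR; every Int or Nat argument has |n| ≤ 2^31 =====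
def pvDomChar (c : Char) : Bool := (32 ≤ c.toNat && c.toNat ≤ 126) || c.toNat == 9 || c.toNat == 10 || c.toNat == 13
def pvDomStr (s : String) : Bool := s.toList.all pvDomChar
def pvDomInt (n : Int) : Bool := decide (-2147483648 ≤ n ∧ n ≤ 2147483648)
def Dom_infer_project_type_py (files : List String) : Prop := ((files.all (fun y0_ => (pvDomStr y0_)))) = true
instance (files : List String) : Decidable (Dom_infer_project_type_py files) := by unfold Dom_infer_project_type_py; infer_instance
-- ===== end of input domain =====

-- B replaces A's build-extensions-list-then-five-category-scans by a single pass with an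
-- extension -> (priority_rank, project_type) table and a running minimum (idiomatic; same result).


-- ===== PORT A =====
-- file.split('.')[-1].lower(): split? with a nonempty separator is always `some` of a
-- nonempty list, so the defaults of getD/getLastD are never reached ([-1] cannot raise here).
def pyExtLast (f : String) : String :=
  PySem.Str.lower (((PySem.Str.split? f ".").getD []).getLastD "")

def infer_project_type_py (files : List String) : String :=
  let extensions := (files.filter (fun f => PySem.Str.isIn "." f)).map pyExtLast
  if ["py"].any (fun e => extensions.contains e) then "python_project"
  else if ["js", "jsx", "ts", "tsx"].any (fun e => extensions.contains e) then "javascript_project"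
  else if ["java"].any (fun e => extensions.contains e) then "java_project"
  else if ["cpp", "c", "h"].any (fun e => extensions.contains e) then "cpp_project"
  else if ["go"].any (fun e => extensions.contains e) then "go_project"
  else "mixed_project"

-- ===== PORT B =====
def extTable : PySem.Dict String (Nat × String) :=
  PySem.Dict.ofList [("py", (0, "python_project")),
    ("js", (1, "javascript_project")), ("jsx", (1, "javascript_project")),
    ("ts", (1, "javascript_project")), ("tsx", (1, "javascript_project")),
    ("java", (2, "java_project")),
    ("cpp", (3, "cpp_project")), ("c", (3, "cpp_project")), ("h", (3, "cpp_project")),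
    ("go", (4, "go_project"))]

def stepBest (best : Option (Nat × String)) (f : String) : Option (Nat × String) :=
  if PySem.Str.isIn "." f then
    match extTable.get? (pyExtLast f) with
    | some (r, t) =>
      match best with
      | none => some (r, t)
      | some (br, bt) => if r < br then some (r, t) else some (br, bt)
    | none => best
  else best

def infer_project_type_py_alt (files : List String) : String :=
  match files.foldl stepBest none with
  | some (_, t) => t
  | none => "mixed_project"

-- ===== PRECONDITION & SPEC =====
def Spec_infer_project_type_py (files : List String) (out : String) : Prop := out = infer_project_type_py_alt files
instance (files : List String) (out : String) : Decidable (Spec_infer_project_type_py files out) := by unfold Spec_infer_project_type_py; infer_instance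

-- ===== CLAIM (what is proved, stated in full; the proofs are below) =====
def Claim_equal_infer_project_type_py : Prop := ∀ (files : List String), Dom_infer_project_type_py files → Spec_infer_project_type_py files (infer_project_type_py files)

-- ===== LEMMAS AND PROOFS =====

-- the rank of a file: its table rank if it has a '.' and a recognized extension
def rk (f : String) : Option Nat :=
  if PySem.Str.isIn "." f then (extTable.get? (pyExtLast f)).map Prod.fst else none

-- the project name of a rank
def rname (r : Nat) : String :=
  match r with
  | 0 => "python_project"
  | 1 => "javascript_project"
  | 2 => "java_project"
  | 3 => "cpp_project"
  | _ => "go_project"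

def canon (r : Nat) : Nat × String := (r, rname r)

-- the extensions A's k-th category tests
def keysOf (k : Nat) : List String :=
  match k with
  | 0 => ["py"] | 1 => ["js", "jsx", "ts", "tsx"] | 2 => ["java"]
  | 3 => ["cpp", "c", "h"] | _ => ["go"]

def omin : Option Nat → Option Nat → Option Nat
  | none, b => b
  | some a, none => some a
  | some a, some b => some (min a b)

def minRank (files : List String) (m : Option Nat) : Option Nat :=
  files.foldl (fun m f => omin m (rk f)) m

lemma extTable_eq : extTable = PySem.Dict.mk
    [("py", (0, "python_project")),
     ("js", (1, "javascript_project")), ("jsx", (1, "javascript_project")),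
     ("ts", (1, "javascript_project")), ("tsx", (1, "javascript_project")),
     ("java", (2, "java_project")),
     ("cpp", (3, "cpp_project")), ("c", (3, "cpp_project")), ("h", (3, "cpp_project")),
     ("go", (4, "go_project"))] := by decide

lemma get?_canon (s : String) (p : Nat × String) (h : extTable.get? s = some p) :
    p = canon p.1 ∧ p.1 < 5 := by
  rw [extTable_eq] at h
  simp only [PySem.Dict.get?_mk_cons] at h
  split_ifs at h <;> simp_all [PySem.Dict.get?] <;> subst h <;> decide

lemma rk_lt5 {f : String} {r : Nat} (h : rk f = some r) : r < 5 := by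
  unfold rk at h
  split_ifs at h
  · cases hg : extTable.get? (pyExtLast f) with
    | none => simp [hg] at h
    | some p =>
      simp [hg] at h
      exact h ▸ (get?_canon _ _ hg).2

set_option maxHeartbeats 1000000 in
lemma get?_fst (s : String) : (extTable.get? s).map Prod.fst =
    (if "py" == s then some 0 else if "js" == s then some 1 else if "jsx" == s then some 1
     else if "ts" == s then some 1 else if "tsx" == s then some 1 else if "java" == s then some 2
     else if "cpp" == s then some 3 else if "c" == s then some 3 else if "h" == s then some 3
     else if "go" == s then some (4:Nat) else none) := by
  rw [extTable_eq]
  simp only [PySem.Dict.get?_mk_cons]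
  split_ifs <;> rfl

set_option maxHeartbeats 1000000 in
set_option maxRecDepth 4096 in
lemma fst_eq (s : String) (k : Nat) (hk : k < 5) :
    ((extTable.get? s).map Prod.fst = some k ↔ s ∈ keysOf k) := by
  rw [get?_fst]
  interval_cases k <;> split_ifs <;> (try simp_all [keysOf]) <;> (repeat' constructor) <;>
    (intro hh; subst hh; simp_all)

lemma rk_eq (f : String) (k : Nat) (hk : k < 5) :
    (rk f = some k ↔ PySem.Str.isIn "." f = true ∧ pyExtLast f ∈ keysOf k) := by
  unfold rk
  split_ifs with h
  · rw [fst_eq _ k hk]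
    simp only [h, true_and]
  · constructor
    · intro hx; cases hx
    · rintro ⟨hdot, -⟩; exact absurd hdot h

lemma cat_eq (files : List String) (k : Nat) (hk : k < 5) :
    ((keysOf k).any
      (fun e => ((files.filter (fun f => PySem.Str.isIn "." f)).map pyExtLast).contains e)
      = files.any (fun f => rk f == some k)) := by
  rw [Bool.eq_iff_iff]
  simp only [List.any_eq_true, List.contains_iff_mem, List.mem_map, List.mem_filter,
    beq_iff_eq]
  constructor
  · rintro ⟨e, he, f, ⟨hf, hdot⟩, hext⟩
    exact ⟨f, hf, (rk_eq f k hk).2 ⟨hdot, hext ▸ he⟩⟩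
  · rintro ⟨f, hf, hr⟩
    obtain ⟨hdot, hmem⟩ := (rk_eq f k hk).1 hr
    exact ⟨pyExtLast f, hmem, f, ⟨hf, hdot⟩, rfl⟩

lemma stepBest_canon (mo : Option Nat) (f : String) :
    stepBest (mo.map canon) f = (omin mo (rk f)).map canon := by
  unfold stepBest rk
  split_ifs with h
  · cases hg : extTable.get? (pyExtLast f) with
    | none => cases mo <;> simp only [Option.map_none, Option.map_some, omin]
    | some p =>
      obtain ⟨hc, _⟩ := get?_canon _ p hg
      cases mo with
      | none =>
        simp only [Option.map_none, Option.map_some, omin]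
        rw [hc]
        simp [canon]
      | some b =>
        simp only [Option.map_some, omin]
        rw [hc]
        by_cases hlt : p.1 < b
        · simp [canon, hlt, Nat.min_eq_right (le_of_lt hlt)]
        · simp [canon, hlt, Nat.min_eq_left (Nat.le_of_not_lt hlt)]
  · cases mo <;> simp [omin]

lemma foldl_stepBest (files : List String) (mo : Option Nat) :
    files.foldl stepBest (mo.map canon) = (minRank files mo).map canon := by
  induction files generalizing mo with
  | nil => simp [minRank]
  | cons f fs ih =>
    simp only [List.foldl_cons, stepBest_canon, minRank]
    exact ih (omin mo (rk f))

lemma minRank_none (files : List String) (mo : Option Nat) :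
    minRank files mo = none ↔ mo = none ∧ ∀ f ∈ files, rk f = none := by
  induction files generalizing mo with
  | nil => simp [minRank]
  | cons f fs ih =>
    simp only [minRank, List.foldl_cons] at *
    rw [ih]
    cases mo <;> cases h : rk f <;> simp [omin, h]

lemma minRank_some (files : List String) (mo : Option Nat) (r : Nat)
    (h : minRank files mo = some r) :
    ((∃ f ∈ files, rk f = some r) ∨ mo = some r) ∧
      (∀ f ∈ files, ∀ r', rk f = some r' → r ≤ r') ∧
      (∀ r', mo = some r' → r ≤ r') := by
  induction files generalizing mo with
  | nil =>
    simp [minRank] at h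
    simp [h]
  | cons f fs ih =>
    simp only [minRank, List.foldl_cons] at h
    obtain ⟨hw, hmin, hacc⟩ := ih (omin mo (rk f)) h
    refine ⟨?_, ?_, ?_⟩
    · rcases hw with ⟨g, hg, hgr⟩ | hw
      · exact Or.inl ⟨g, List.mem_cons_of_mem _ hg, hgr⟩
      · cases mo <;> cases hrf : rk f <;> simp [omin, hrf] at hw
        · exact Or.inl ⟨f, List.mem_cons_self, hrf ▸ congrArg some hw⟩
        · exact Or.inr (congrArg some hw)
        · rename_i a b
          rcases Nat.le_total a b with hab | hab
          · right; rw [Nat.min_eq_left hab] at hw; exact congrArg some hw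
          · left
            refine ⟨f, List.mem_cons_self, ?_⟩
            rw [Nat.min_eq_right hab] at hw
            exact hrf.trans (congrArg some hw)
    · intro g hg r' hr'
      rcases List.mem_cons.1 hg with rfl | hg
      · cases hmo : mo with
        | none => exact hacc r' (by simp [omin, hmo, hr'])
        | some a =>
          have := hacc (min a r') (by simp [omin, hmo, hr'])
          omega
      · exact hmin g hg r' hr'
    · intro r' hmo
      subst hmo
      cases hrf : rk f with
      | none => exact hacc r' (by simp [omin, hrf])
      | some b =>
        have := hacc (min r' b) (by simp [omin, hrf])
        omega

lemma A_form (files : List String) :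
    infer_project_type_py files =
      (if files.any (fun f => rk f == some 0) then "python_project"
       else if files.any (fun f => rk f == some 1) then "javascript_project"
       else if files.any (fun f => rk f == some 2) then "java_project"
       else if files.any (fun f => rk f == some 3) then "cpp_project"
       else if files.any (fun f => rk f == some 4) then "go_project"
       else "mixed_project") := by
  rw [show infer_project_type_py files =
      (if (keysOf 0).any (fun e => ((files.filter (fun f => PySem.Str.isIn "." f)).map pyExtLast).contains e) then "python_project"
       else if (keysOf 1).any (fun e => ((files.filter (fun f => PySem.Str.isIn "." f)).map pyExtLast).contains e) then "javascript_project"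
       else if (keysOf 2).any (fun e => ((files.filter (fun f => PySem.Str.isIn "." f)).map pyExtLast).contains e) then "java_project"
       else if (keysOf 3).any (fun e => ((files.filter (fun f => PySem.Str.isIn "." f)).map pyExtLast).contains e) then "cpp_project"
       else if (keysOf 4).any (fun e => ((files.filter (fun f => PySem.Str.isIn "." f)).map pyExtLast).contains e) then "go_project"
       else "mixed_project") from rfl,
    cat_eq files 0 (by omega), cat_eq files 1 (by omega), cat_eq files 2 (by omega),
    cat_eq files 3 (by omega), cat_eq files 4 (by omega)]

lemma B_form (files : List String) :
    infer_project_type_py_alt files =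
      (match minRank files none with
       | some r => rname r
       | none => "mixed_project") := by
  unfold infer_project_type_py_alt
  have h := foldl_stepBest files none
  simp only [Option.map_none] at h
  rw [h]
  cases minRank files none <;> simp [canon]

-- ===== VERDICT (by name: the statement is the Claim_ definition above) =====
theorem infer_project_type_py_spec : Claim_equal_infer_project_type_py := by
  intro files _
  unfold Spec_infer_project_type_py
  rw [A_form, B_form]
  cases hm : minRank files none with
  | none =>
    obtain ⟨-, hall⟩ := (minRank_none files none).1 hm
    have hany : ∀ k : Nat, files.any (fun f => rk f == some k) = false := by
      intro k
      simp only [List.any_eq_false, beq_iff_eq]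
      intro f hf
      simp [hall f hf]
    simp [hany]
  | some r =>
    obtain ⟨hw, hmin, -⟩ := minRank_some files none r hm
    rcases hw with ⟨f, hf, hfr⟩ | hw
    · have hr5 : r < 5 := rk_lt5 hfr
      have htrue : files.any (fun f => rk f == some r) = true := by
        simp only [List.any_eq_true, beq_iff_eq]
        exact ⟨f, hf, hfr⟩
      have hfalse : ∀ k, k < r → files.any (fun f => rk f == some k) = false := by
        intro k hk
        simp only [List.any_eq_false, beq_iff_eq]
        intro g hg hgk
        exact absurd (hmin g hg k hgk) (by omega)
      interval_cases r
      · rw [htrue]; simp [rname]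
      · rw [hfalse 0 (by omega), htrue]; simp [rname]
      · rw [hfalse 0 (by omega), hfalse 1 (by omega), htrue]; simp [rname]
      · rw [hfalse 0 (by omega), hfalse 1 (by omega), hfalse 2 (by omega), htrue]
        simp [rname]
      · rw [hfalse 0 (by omega), hfalse 1 (by omega), hfalse 2 (by omega),
          hfalse 3 (by omega), htrue]
        simp [rname]
    · simp at hw
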